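-- pv_equiv track=rewrite | github.com/alexbond85/asd | generate_bbst_array/gen_bbst_arr.py | GenerateBBSTArray
-- ===== SOURCE A (Python) =====
-- def GenerateBBSTArray(a):
--     def middle_element_left_right_array(arr):
--         start = 0
--         stop = len(arr)
--         index = int((stop - start) / 2)
--         left = arr[start: index]
--         right = arr[index + 1:]
--         return arr[index], left, right
--
--     if len(a) == 0:
--         return a
--
--     input_arr = sorted(a)
--     queue = [input_arr]
--     output = [None]*len(input_arr)
--     counter = 0
--     while len(queue) > 0:
--         next_level = []
--         for q in queue:
--             elem, left, right = middle_element_left_right_array(q)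
--             output[counter] = elem
--             counter += 1
--             if len(left) > 0:
--                 next_level.append(left)
--             if len(right) > 0:
--                 next_level.append(right)
--         queue = next_level
--     return output
-- ===== SOURCE B (Python) =====
-- def GenerateBBSTArray(a):
--     # Recursive preorder DFS grouped by depth instead of an explicit BFS queue.
--     if len(a) == 0:
--         return a
--     arr = sorted(a)
--     levels = []
--
--     def build(sub, depth):
--         if not sub:
--             return
--         mid = len(sub) // 2
--         if depth == len(levels):
--             levels.append([])
--         levels[depth].append(sub[mid])
--         build(sub[:mid], depth + 1)
--         build(sub[mid + 1:], depth + 1)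
--
--     build(arr, 0)
--     out = []
--     for lv in levels:
--         out.extend(lv)
--     return out
-- ===== Notes on version B (the rewrite author's own statement) =====
-- stated objective: alternative
-- what changed: The explicit BFS queue of subarrays with a preallocated output slot counter is replaced by a recursive preorder DFS that groups emitted midpoints into per-depth level lists, concatenated at the end.
import Mathlib
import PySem

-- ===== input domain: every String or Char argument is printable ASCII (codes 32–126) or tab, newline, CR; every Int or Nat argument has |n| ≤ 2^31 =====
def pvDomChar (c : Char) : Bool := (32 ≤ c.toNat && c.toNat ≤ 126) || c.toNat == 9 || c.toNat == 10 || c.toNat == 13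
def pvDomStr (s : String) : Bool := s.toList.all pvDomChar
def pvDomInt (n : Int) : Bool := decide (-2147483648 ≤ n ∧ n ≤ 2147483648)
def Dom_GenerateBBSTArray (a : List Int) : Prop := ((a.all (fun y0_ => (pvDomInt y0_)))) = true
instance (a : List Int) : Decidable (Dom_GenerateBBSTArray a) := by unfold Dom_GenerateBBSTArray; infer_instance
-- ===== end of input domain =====

-- B replaces A's explicit BFS queue (with its write-slot counter) by a recursive preorder DFS
-- that collects each midpoint into a per-depth level list and concatenates the levels at the end.


-- ===== PORT A =====
-- middle_element_left_right_array(arr): arr[index] is in range wherever A evaluates it (the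
-- queue only ever holds non-empty lists), so pyGetD with an unused default is exact there;
-- int((stop - start)/2) is Python's truncating int-of-float division, exact at these sizes:
-- PySem.Int.truncdiv.
-- abbreviations used by the loop-shape lemmas the termination argument cites
def pvHead (q : List Int) : Int := q.getD (q.length / 2) 0
def pvCh (q : List Int) : List (List Int) :=
  (if (q.take (q.length / 2)).length > 0 then [q.take (q.length / 2)] else []) ++
  (if (q.drop (q.length / 2 + 1)).length > 0 then [q.drop (q.length / 2 + 1)] else [])
def pvMiddleA (arr : List Int) : Int × List Int × List Int :=
  let index : Int := PySem.Int.truncdiv (PySem.List.len arr - 0) 2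
  (PySem.List.pyGetD arr index 0, PySem.List.slice arr (some 0) (some index),
   PySem.List.slice arr (some (index + 1)) none)
theorem pvMiddleA_eq (q : List Int) :
    pvMiddleA q = (pvHead q, q.take (q.length / 2), q.drop (q.length / 2 + 1)) := by
  have h2 : PySem.Int.truncdiv (q.length : Int) 2 = ((q.length / 2 : Nat) : Int) := by
    simp [PySem.Int.truncdiv]
  have h3 : ((q.length / 2 : Nat) : Int) + 1 = ((q.length / 2 + 1 : Nat) : Int) := by push_cast; ring
  simp only [pvMiddleA, PySem.List.len_eq, sub_zero, h2, h3, pvHead,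
    PySem.List.pyGetD_natCast, PySem.List.slice_zero_start, PySem.List.slice_to_natCast,
    PySem.List.slice_from_natCast]
-- body of the inner `for q in queue` loop; `output[counter] = elem; counter += 1` fills the
-- [None]*n slots strictly left to right, which is exactly appending in order
def pvStepA (st : List Int × List (List Int)) (q : List Int) : List Int × List (List Int) :=
  match pvMiddleA q with
  | (elem, left, right) =>
    let out := st.1 ++ [elem]
    let nl := if left.length > 0 then st.2 ++ [left] else st.2
    let nl := if right.length > 0 then nl ++ [right] else nl
    (out, nl)
theorem pvStepA_eq (out : List Int) (nl : List (List Int)) (q : List Int) :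
    pvStepA (out, nl) q = (out ++ [pvHead q], nl ++ pvCh q) := by
  simp only [pvStepA, pvMiddleA_eq, pvCh]
  split_ifs <;> simp
theorem pvFoldl_stepA (qs : List (List Int)) (out : List Int) (nl : List (List Int)) :
    qs.foldl pvStepA (out, nl) = (out ++ qs.map pvHead, nl ++ qs.flatMap pvCh) := by
  induction qs generalizing out nl with
  | nil => simp
  | cons q qs ih => simp [List.foldl_cons, pvStepA_eq, ih]
-- termination measure for A's while-loop: Σ (2·|q| + 1) over the queue
def pvMu (qs : List (List Int)) : Nat := (qs.map (fun q => 2 * q.length + 1)).sum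
theorem pvMu_ch_le (q : List Int) : pvMu (pvCh q) ≤ 2 * q.length := by
  simp only [pvCh, pvMu]
  split_ifs <;> simp_all <;> omega
theorem pvMu_flatMap_le (qs : List (List Int)) :
    pvMu (qs.flatMap pvCh) ≤ (qs.map (fun q => 2 * q.length)).sum := by
  induction qs with
  | nil => simp [pvMu]
  | cons q qs ih =>
    have h := pvMu_ch_le q
    simp only [List.flatMap_cons, List.map_cons, List.sum_cons, pvMu, List.map_append,
      List.sum_append] at *
    omega
theorem pvMu_eq_sum (qs : List (List Int)) :
    pvMu qs = (qs.map (fun q => 2 * q.length)).sum + qs.length := by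
  induction qs with
  | nil => simp [pvMu]
  | cons q qs ih => simp only [pvMu, List.map_cons, List.sum_cons, List.length_cons] at *; omega
theorem pvMu_dec (qs : List (List Int)) (h : qs ≠ []) :
    pvMu (qs.flatMap pvCh) < pvMu qs := by
  have h1 := pvMu_flatMap_le qs
  have h2 := pvMu_eq_sum qs
  have h3 : 0 < qs.length := List.length_pos_of_ne_nil h
  omega
-- the `while len(queue) > 0:` loop
def pvLoopA (queue : List (List Int)) (output : List Int) : List Int :=
  if h : queue.length > 0 then
    let step := queue.foldl pvStepA (output, ([] : List (List Int)))
    pvLoopA step.2 step.1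
  else output
termination_by pvMu queue
decreasing_by
  have hne : queue ≠ [] := by intro hq; simp [hq] at h
  have := pvMu_dec queue hne
  simpa [pvFoldl_stepA] using this

def GenerateBBSTArray (a : List Int) : List Int :=
  if PySem.List.len a = 0 then a
  else
    let input_arr := PySem.List.sorted a (fun x => x) false
    pvLoopA [input_arr] []


-- ===== PORT B =====
-- build(sub, depth): preorder DFS appending each midpoint to the level list of its depth
def pvBuildB (arr : List Int) (depth : Nat) (levels : List (List Int)) : List (List Int) :=
  if _h : arr.length = 0 then levels
  else
    let mid : Nat := arr.length / 2
    let levels1 := if depth = levels.length then levels ++ [[]] else levels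
    let levels2 := levels1.set depth (levels1.getD depth [] ++ [PySem.List.pyGetD arr (mid : Int) 0])
    let levels3 := pvBuildB (PySem.List.slice arr none (some (mid : Int))) (depth + 1) levels2
    pvBuildB (PySem.List.slice arr (some ((mid + 1 : Nat) : Int)) none) (depth + 1) levels3
termination_by arr.length
decreasing_by
  · simp only [PySem.List.slice_to_natCast, List.length_take]
    omega
  · simp only [PySem.List.slice_from_natCast, List.length_drop]
    omega

def GenerateBBSTArray_alt (a : List Int) : List Int :=
  if a.length = 0 then a
  else
    let arr := PySem.List.sorted a (fun x => x) false
    let levels := pvBuildB arr 0 []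
    levels.foldl (fun out lv => out ++ lv) []


-- ===== PRECONDITION & SPEC =====
def Spec_GenerateBBSTArray (a : List Int) (out : List Int) : Prop := out = GenerateBBSTArray_alt a
instance (a : List Int) (out : List Int) : Decidable (Spec_GenerateBBSTArray a out) := by unfold Spec_GenerateBBSTArray; infer_instance

-- ===== CLAIM (what is proved, stated in full; the proofs are below) =====
def Claim_equal_GenerateBBSTArray : Prop := ∀ (a : List Int), Dom_GenerateBBSTArray a → Spec_GenerateBBSTArray a (GenerateBBSTArray a)

-- ===== LEMMAS AND PROOFS =====
-- pvLv arr: the per-depth levels of the BBST built from arr — head level [midpoint], deeper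
-- levels are the left subtree's levels merged pointwise (left before right) with the right's.
-- Both programs are shown to produce (pvLv (sorted a)).flatten.
def pvMerge : List (List Int) → List (List Int) → List (List Int)
  | [], ys => ys
  | xs, [] => xs
  | x :: xs, y :: ys => (x ++ y) :: pvMerge xs ys
def pvLv (arr : List Int) : List (List Int) :=
  if h : arr.length = 0 then []
  else
    [pvHead arr] :: pvMerge (pvLv (arr.take (arr.length / 2))) (pvLv (arr.drop (arr.length / 2 + 1)))
termination_by arr.length
decreasing_by
  · simp only [List.length_take]; omega
  · simp only [List.length_drop]; omega
def pvMergeAll (qs : List (List Int)) : List (List Int) :=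
  qs.foldr (fun q acc => pvMerge (pvLv q) acc) []
theorem pvMerge_nil_right (xs : List (List Int)) : pvMerge xs [] = xs := by
  cases xs <;> rfl
theorem pvMerge_assoc (a b c : List (List Int)) :
    pvMerge (pvMerge a b) c = pvMerge a (pvMerge b c) := by
  induction a generalizing b c with
  | nil => rfl
  | cons x xs ih =>
    cases b with
    | nil => simp [pvMerge]
    | cons y ys =>
      cases c with
      | nil => simp [pvMerge_nil_right, pvMerge]
      | cons z zs => simp [pvMerge, ih]
theorem pvMergeAll_append (xs ys : List (List Int)) :
    pvMergeAll (xs ++ ys) = pvMerge (pvMergeAll xs) (pvMergeAll ys) := by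
  induction xs with
  | nil => simp [pvMergeAll, pvMerge]
  | cons x xs ih => simp only [pvMergeAll, List.foldr_cons, List.cons_append] at *
                    rw [ih, pvMerge_assoc]
theorem pvMergeAll_singleton (q : List Int) : pvMergeAll [q] = pvLv q := by
  simp [pvMergeAll, pvMerge_nil_right]
theorem pvMergeAll_ch (q : List Int) :
    pvMergeAll (pvCh q) =
      pvMerge (pvLv (q.take (q.length / 2))) (pvLv (q.drop (q.length / 2 + 1))) := by
  have hl : ∀ r : List Int, r.length = 0 → pvLv r = [] := by intro r hr; rw [pvLv]; simp [hr]
  simp only [pvCh]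
  split_ifs with h1 h2 h2
  · simp only [List.cons_append, List.nil_append, pvMergeAll, List.foldr_cons, List.foldr_nil]
    rw [pvMerge_nil_right]
  · rw [hl (q.drop (q.length / 2 + 1)) (by omega)]
    simp only [List.append_nil, pvMergeAll, List.foldr_cons, List.foldr_nil]
  · rw [hl (q.take (q.length / 2)) (by omega)]
    simp only [List.nil_append, pvMergeAll, List.foldr_cons, List.foldr_nil]
    rw [pvMerge_nil_right]
    rfl
  · rw [hl (q.take (q.length / 2)) (by omega), hl (q.drop (q.length / 2 + 1)) (by omega)]
    rfl
theorem pvLv_cons (q : List Int) (h : q ≠ []) :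
    pvLv q = [pvHead q] :: pvMergeAll (pvCh q) := by
  rw [pvLv, pvMergeAll_ch]
  simp [List.length_eq_zero_iff, h]
theorem pvMergeAll_step (qs : List (List Int)) (hne : qs ≠ []) (hq : ∀ q ∈ qs, q ≠ []) :
    pvMergeAll qs = (qs.map pvHead) :: pvMergeAll (qs.flatMap pvCh) := by
  induction qs with
  | nil => simp at hne
  | cons q qs ih =>
    have hqne : q ≠ [] := hq q (by simp)
    cases qs with
    | nil => simp [pvMergeAll_singleton, pvLv_cons q hqne]
    | cons p ps =>
      have ih2 := ih (by simp) (fun r hr => hq r (by simp [hr]))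
      have : pvMergeAll (q :: p :: ps) = pvMerge (pvLv q) (pvMergeAll (p :: ps)) := rfl
      rw [this, ih2, pvLv_cons q hqne]
      simp only [pvMerge, List.map_cons, List.flatMap_cons]
      simp only [pvMergeAll_append, List.singleton_append]
theorem pvLoopA_eq (n : Nat) : ∀ (queue : List (List Int)) (output : List Int),
    pvMu queue = n → (∀ q ∈ queue, q ≠ []) →
    pvLoopA queue output = output ++ (pvMergeAll queue).flatten := by
  induction n using Nat.strong_induction_on with
  | _ n ih =>
    intro queue output hmu hq
    rw [pvLoopA]
    by_cases hne : queue = []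
    · subst hne; simp [pvMergeAll]
    · have hlen : queue.length > 0 := List.length_pos_of_ne_nil hne
      rw [dif_pos hlen]
      have hdec := pvMu_dec queue hne
      have hch : ∀ r ∈ queue.flatMap pvCh, r ≠ [] := by
        intro r hr
        obtain ⟨q, hqmem, hrch⟩ := List.mem_flatMap.mp hr
        simp only [pvCh] at hrch
        rcases List.mem_append.mp hrch with h | h <;> split_ifs at h with hc <;>
          simp only [List.mem_singleton, List.not_mem_nil] at h <;>
          subst h <;> exact List.ne_nil_of_length_pos hc
      simp only [pvFoldl_stepA, List.nil_append]
      rw [ih (pvMu (queue.flatMap pvCh)) (by omega) _ _ rfl hch]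
      rw [pvMergeAll_step queue hne hq]
      simp [List.flatten_cons, List.append_assoc]

theorem pvBuildB_eq (n : Nat) : ∀ (arr : List Int) (depth : Nat) (levels : List (List Int)),
    arr.length = n → depth ≤ levels.length →
    pvBuildB arr depth levels =
      levels.take depth ++ pvMerge (levels.drop depth) (pvLv arr) := by
  induction n using Nat.strong_induction_on with
  | _ n ih =>
    intro arr depth levels hlen hdep
    rw [pvBuildB, pvLv]
    by_cases h0 : arr.length = 0
    · rw [dif_pos h0, dif_pos h0]
      rw [pvMerge_nil_right, List.take_append_drop]
    · rw [dif_neg h0, dif_neg h0]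
      simp only [PySem.List.slice_to_natCast, PySem.List.slice_from_natCast,
        PySem.List.pyGetD_natCast]
      have hmh : arr.getD (arr.length / 2) 0 = pvHead arr := rfl
      rw [hmh]
      have hltL : (arr.take (arr.length / 2)).length < n := by
        simp only [List.length_take]; omega
      have hltR : (arr.drop (arr.length / 2 + 1)).length < n := by
        simp only [List.length_drop]; omega
      by_cases hd : depth = levels.length
      · subst hd
        rw [if_pos rfl]
        have hget : (levels ++ [[]]).getD levels.length [] = ([] : List Int) := by simp
        have hset : (levels ++ [([] : List Int)]).set levels.length ([] ++ [pvHead arr]) =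
            levels ++ [[pvHead arr]] := by simp
        rw [hget, hset]
        rw [ih _ hltL _ (levels.length + 1) (levels ++ [[pvHead arr]]) rfl (by simp)]
        have htake : (levels ++ [[pvHead arr]]).take (levels.length + 1) = levels ++ [[pvHead arr]] := by
          apply List.take_of_length_le; simp
        have hdrop : (levels ++ [[pvHead arr]]).drop (levels.length + 1) = ([] : List (List Int)) := by
          apply List.drop_of_length_le; simp
        rw [htake, hdrop]
        have hmg : pvMerge [] (pvLv (arr.take (arr.length / 2))) = pvLv (arr.take (arr.length / 2)) := rfl
        rw [hmg, List.append_assoc, List.singleton_append]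
        rw [ih _ hltR _ (levels.length + 1) (levels ++ [pvHead arr] :: pvLv (arr.take (arr.length / 2))) rfl
            (by simp)]
        have htake2 : (levels ++ [pvHead arr] :: pvLv (arr.take (arr.length / 2))).take (levels.length + 1) =
            levels ++ [[pvHead arr]] := by simp [List.take_append]
        have hdrop2 : (levels ++ [pvHead arr] :: pvLv (arr.take (arr.length / 2))).drop (levels.length + 1) =
            pvLv (arr.take (arr.length / 2)) := by simp [List.drop_append]
        rw [htake2, hdrop2, List.take_length, List.drop_length]
        have hmg2 : pvMerge []
            ([pvHead arr] :: pvMerge (pvLv (arr.take (arr.length / 2))) (pvLv (arr.drop (arr.length / 2 + 1)))) =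
            [pvHead arr] :: pvMerge (pvLv (arr.take (arr.length / 2))) (pvLv (arr.drop (arr.length / 2 + 1))) := rfl
        rw [hmg2, List.append_assoc, List.singleton_append]
      · rw [if_neg hd]
        have hdlt : depth < levels.length := lt_of_le_of_ne hdep hd
        obtain ⟨T, e, R, hTlen, hTe⟩ :
            ∃ T e R, T.length = depth ∧ levels = T ++ e :: R :=
          ⟨levels.take depth, levels[depth], levels.drop (depth + 1),
            by simp only [List.length_take]; omega,
            by rw [List.getElem_cons_drop, List.take_append_drop]⟩
        subst hTe
        subst hTlen
        have hget : (T ++ e :: R).getD T.length [] = e := by simp [List.getD]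
        have hset : (T ++ e :: R).set T.length (e ++ [pvHead arr]) = T ++ (e ++ [pvHead arr]) :: R := by
          simp
        rw [hget, hset]
        rw [ih _ hltL _ (T.length + 1) (T ++ (e ++ [pvHead arr]) :: R) rfl (by simp)]
        have htake : (T ++ (e ++ [pvHead arr]) :: R).take (T.length + 1) = T ++ [e ++ [pvHead arr]] := by
          simp [List.take_append]
        have hdrop : (T ++ (e ++ [pvHead arr]) :: R).drop (T.length + 1) = R := by
          simp [List.drop_append]
        rw [htake, hdrop, List.append_assoc, List.singleton_append]
        rw [ih _ hltR _ (T.length + 1)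
            (T ++ (e ++ [pvHead arr]) :: pvMerge R (pvLv (arr.take (arr.length / 2)))) rfl (by simp)]
        have htake2 : (T ++ (e ++ [pvHead arr]) :: pvMerge R (pvLv (arr.take (arr.length / 2)))).take
            (T.length + 1) = T ++ [e ++ [pvHead arr]] := by simp [List.take_append]
        have hdrop2 : (T ++ (e ++ [pvHead arr]) :: pvMerge R (pvLv (arr.take (arr.length / 2)))).drop
            (T.length + 1) = pvMerge R (pvLv (arr.take (arr.length / 2))) := by simp [List.drop_append]
        rw [htake2, hdrop2, List.take_left, List.drop_left]
        have hmg : pvMerge (e :: R)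
            ([pvHead arr] :: pvMerge (pvLv (arr.take (arr.length / 2))) (pvLv (arr.drop (arr.length / 2 + 1)))) =
            (e ++ [pvHead arr]) ::
              pvMerge R (pvMerge (pvLv (arr.take (arr.length / 2))) (pvLv (arr.drop (arr.length / 2 + 1)))) := rfl
        rw [hmg, pvMerge_assoc, List.append_assoc, List.singleton_append]
theorem pvFoldl_flatten (ls : List (List Int)) (acc : List Int) :
    ls.foldl (fun out lv => out ++ lv) acc = acc ++ ls.flatten := by
  induction ls generalizing acc with
  | nil => simp
  | cons l ls ih => simp [ih]

theorem pvMain_eq (a : List Int) : GenerateBBSTArray a = GenerateBBSTArray_alt a := by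
  by_cases h : a.length = 0
  · simp [GenerateBBSTArray, GenerateBBSTArray_alt, PySem.List.len_eq, h]
  · have hlen0 : PySem.List.len a ≠ 0 := by
      rw [PySem.List.len_eq]
      intro hc
      exact h (by exact_mod_cast hc)
    have hs : PySem.List.sorted a (fun x => x) false ≠ [] := by
      intro hnil
      have h2 := congrArg List.length hnil
      rw [PySem.List.length_sorted] at h2
      simp at h2
      exact h (by simp [h2])
    rw [GenerateBBSTArray, GenerateBBSTArray_alt, if_neg hlen0, if_neg h]
    rw [pvLoopA_eq (pvMu [PySem.List.sorted a (fun x => x) false]) _ _ rfl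
        (by intro q hq; simp at hq; subst hq; exact hs)]
    show _ = List.foldl (fun out lv => out ++ lv) []
        (pvBuildB (PySem.List.sorted a (fun x => x) false) 0 [])
    rw [pvBuildB_eq ((PySem.List.sorted a (fun x => x) false).length) _ 0 [] rfl (by simp)]
    rw [pvFoldl_flatten, pvMergeAll_singleton]
    simp [pvMerge]

-- ===== VERDICT (by name: the statement is the Claim_ definition above) =====
theorem GenerateBBSTArray_spec : Claim_equal_GenerateBBSTArray := by
  intro a _
  unfold Spec_GenerateBBSTArray
  exact pvMain_eq a
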